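-- pv_equiv track=rewrite | github.com/Evanev7/lang | comonads/thing.py | solution
-- ===== SOURCE A (Python) =====
-- def solution(A):
--     # Each integer can occur at most twice, except the maximum which can occur exactly once.
--     # N >= 1 so we have at least one integer.
--     m = max(A)
--     sol = {}
--     out = 0
--     # O(n)
--     for i in A:
--         if i not in sol.keys():
--             sol[i] = 1
--             out += 1
--         else:
--             sol[i] += 1
--             if sol[i] == 2:
--                 out += 1
--
--     # Example 3
--     if sol[m] >= 2:
--         out -= 1
--
--     return out
-- ===== SOURCE B (Python) =====
-- def solution(A):
--     m = max(A)
--     distinct = list(dict.fromkeys(A))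
--     out = len(distinct) + len([v for v in distinct if A.count(v) >= 2])
--     return out - 1 if A.count(m) >= 2 else out
-- ===== Notes on version B (the rewrite author's own statement) =====
-- stated objective: simpler
-- what changed: Replaced the incremental counting dict with its running total and final dict lookup by a dedup pass plus per-distinct-value count scans: out = #distinct + #values occurring at least twice, minus 1 if the maximum occurs at least twice.
import Mathlib
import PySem

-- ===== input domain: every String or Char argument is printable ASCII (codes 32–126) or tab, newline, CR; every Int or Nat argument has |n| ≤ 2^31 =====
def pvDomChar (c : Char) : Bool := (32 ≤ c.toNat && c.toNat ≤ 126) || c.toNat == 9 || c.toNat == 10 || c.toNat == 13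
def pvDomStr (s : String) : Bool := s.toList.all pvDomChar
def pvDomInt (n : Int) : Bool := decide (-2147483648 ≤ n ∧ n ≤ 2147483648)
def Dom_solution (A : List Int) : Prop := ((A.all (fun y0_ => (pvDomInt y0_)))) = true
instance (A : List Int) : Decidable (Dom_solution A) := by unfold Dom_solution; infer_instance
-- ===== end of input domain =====

-- B replaces A's incremental counting dict and running total by a dedup pass plus
-- per-distinct-value count scans (simpler decomposition; not faster).


-- ===== PORT A =====
-- one loop iteration of A: the counting dict `sol` together with the running `out`
def stepA (st : PySem.Dict Int Int × Int) (i : Int) : PySem.Dict Int Int × Int :=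
  if st.1.contains i = false then
    (st.1.insert i 1, st.2 + 1)
  else
    let c := st.1.getD i 0 + 1  -- sol[i] += 1 (key present in this branch)
    (st.1.insert i c, if c = 2 then st.2 + 1 else st.2)

def solution (A : List Int) : Int :=
  match PySem.List.max? A (fun x => x) with
  | none => 0  -- max([]) raises ValueError; excluded by Pre_solution
  | some m =>
    let st := A.foldl stepA (PySem.Dict.empty, 0)
    if 2 ≤ st.1.getD m 0 then st.2 - 1 else st.2  -- sol[m]: m ∈ A so the key is present

-- ===== PORT B =====
def solution_alt (A : List Int) : Int :=
  match PySem.List.max? A (fun x => x) with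
  | none => 0  -- max(A) raises ValueError on []; excluded by Pre_solution
  | some m =>
    let distinct := PySem.List.dedup A  -- list(dict.fromkeys(A))
    let out : Int := (distinct.length : Int) +
      ((distinct.filter (fun v => 2 ≤ PySem.List.count A v)).length : Int)
    if 2 ≤ PySem.List.count A m then out - 1 else out

-- ===== PRECONDITION & SPEC =====
-- Pre_ excludes only the empty list, on which both Pythons raise ValueError (max of empty sequence).
def Pre_solution (A : List Int) : Prop := A ≠ []
instance (A : List Int) : Decidable (Pre_solution A) := by unfold Pre_solution; infer_instance
def pvWitness_solution : List Int := ([1, 2, 2, 3] : List Int)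

def Spec_solution (A : List Int) (out : Int) : Prop := out = solution_alt A
instance (A : List Int) (out : Int) : Decidable (Spec_solution A out) := by unfold Spec_solution; infer_instance

-- ===== CLAIM (what is proved, stated in full; the proofs are below) =====
def Claim_equal_solution : Prop := ∀ (A : List Int), Dom_solution A → Pre_solution A → Spec_solution A (solution A)

-- ===== LEMMAS AND PROOFS =====

-- the common value both loops compute before the maximum adjustment: Σ_{v distinct in l} min(count v, 2)
def Mval (l : List Int) : Int :=
  ((PySem.List.dedup l).map (fun v => min ((l.count v : Int)) 2)).sum

theorem modify_eq_insert (d : PySem.Dict Int Int) (k : Int) (f : Int → Int) :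
    d.modify k 0 f = d.insert k (f (d.getD k 0)) := PySem.Dict.ext_iff.mpr rfl

theorem dedup_append_singleton (l : List Int) (i : Int) :
    PySem.List.dedup (l ++ [i]) =
      if i ∈ l then PySem.List.dedup l else PySem.List.dedup l ++ [i] := by
  simp only [PySem.List.dedup_eq_ofList, PySem.Set.ofList_eq_foldl, List.foldl_append,
    List.foldl_cons, List.foldl_nil]
  rw [← PySem.Set.ofList_eq_foldl]
  by_cases h : i ∈ l <;>
    simp [PySem.Set.add, PySem.Set.contains, h, PySem.Set.mem_ofList]

theorem sum_shift (xs : List Int) (hnd : xs.Nodup) (i : Int) (hi : i ∈ xs) (f g : Int → Int)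
    (h : ∀ v ∈ xs, v ≠ i → f v = g v) :
    (xs.map f).sum = (xs.map g).sum + (f i - g i) := by
  induction xs with
  | nil => cases hi
  | cons x t ih =>
    rcases List.nodup_cons.mp hnd with ⟨hx, hnt⟩
    simp only [List.map_cons, List.sum_cons]
    rcases List.mem_cons.mp hi with rfl | hit
    · have ht : (t.map f).sum = (t.map g).sum := by
        apply congrArg List.sum
        apply List.map_congr_left
        intro v hv
        exact h v (List.mem_cons_of_mem _ hv) (fun e => hx (e ▸ hv))
      rw [ht]; ring
    · rw [h x List.mem_cons_self (by rintro rfl; exact hx hit),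
        ih hnt hit (fun v hv hne => h v (List.mem_cons_of_mem _ hv) hne)]
      ring

theorem Mval_append_not_mem (l : List Int) (i : Int) (h : i ∉ l) :
    Mval (l ++ [i]) = Mval l + 1 := by
  unfold Mval
  rw [dedup_append_singleton, if_neg h, List.map_append, List.sum_append]
  have h1 : (PySem.List.dedup l).map (fun v => min (((l ++ [i]).count v : Int)) 2)
      = (PySem.List.dedup l).map (fun v => min ((l.count v : Int)) 2) := by
    apply List.map_congr_left
    intro v hv
    have hvl : v ∈ l := (PySem.List.mem_dedup l v).mp hv
    have hz : List.count v [i] = 0 := List.count_eq_zero.mpr (by simp; rintro rfl; exact h hvl)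
    show min (((l ++ [i]).count v : Int)) 2 = min ((l.count v : Int)) 2
    rw [List.count_append, hz, Nat.add_zero]
  have h2 : (l ++ [i]).count i = 1 := by
    rw [List.count_append, List.count_eq_zero_of_not_mem h]
    simp
  rw [h1]
  simp only [List.map_cons, List.map_nil, List.sum_cons, List.sum_nil, add_zero]
  show _ + min (((l ++ [i]).count i : Int)) 2 = _
  rw [h2]
  norm_num

theorem Mval_append_mem (l : List Int) (i : Int) (h : i ∈ l) :
    Mval (l ++ [i]) = Mval l + (min ((l.count i : Int) + 1) 2 - min ((l.count i : Int)) 2) := by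
  unfold Mval
  rw [dedup_append_singleton, if_pos h]
  have hcnt : ((l ++ [i]).count i : Int) = (l.count i : Int) + 1 := by
    rw [List.count_append]; simp
  have := sum_shift (PySem.List.dedup l) (PySem.List.nodup_dedup l)
      i ((PySem.List.mem_dedup l i).mpr h)
      (fun v => min (((l ++ [i]).count v : Int)) 2)
      (fun v => min ((l.count v : Int)) 2)
      (by
        intro v hv hne
        have hz : List.count v [i] = 0 := List.count_eq_zero.mpr (by simp [hne])
        show min (((l ++ [i]).count v : Int)) 2 = min ((l.count v : Int)) 2
        rw [List.count_append, hz, Nat.add_zero])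
  rw [this]
  simp only [hcnt]

theorem foldA_eq (l : List Int) :
    List.foldl stepA (PySem.Dict.empty, 0) l = (PySem.Dict.counter l, Mval l) := by
  induction l using List.reverseRecOn with
  | nil => rfl
  | append_singleton l i ih =>
    rw [List.foldl_append, ih, List.foldl_cons, List.foldl_nil,
      PySem.Dict.counter_append_singleton, modify_eq_insert]
    have hd : (PySem.Dict.counter l).getD i 0 = (List.count i l : Int) :=
      PySem.Dict.getD_counter l i
    by_cases hm : i ∈ l
    · have hc : (PySem.Dict.counter l).contains i = true := by
        rw [PySem.Dict.contains_counter]; simp [hm]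
      have hone : (1 : Int) ≤ (List.count i l : Int) := by
        exact_mod_cast List.one_le_count_iff.mpr hm
      rw [Mval_append_mem l i hm]
      simp only [stepA, hc, hd]
      rw [if_neg (by simp), Prod.mk.injEq]
      refine ⟨rfl, ?_⟩
      by_cases h2 : (List.count i l : Int) + 1 = 2
      · rw [if_pos h2]
        have hm1 : min ((List.count i l : Int) + 1) 2 = 2 := by omega
        have hm2 : min ((List.count i l : Int)) 2 = 1 := by omega
        rw [hm1, hm2]; ring
      · rw [if_neg h2]
        have hm1 : min ((List.count i l : Int) + 1) 2 = 2 := by omega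
        have hm2 : min ((List.count i l : Int)) 2 = 2 := by omega
        rw [hm1, hm2]; ring
    · have hc : (PySem.Dict.counter l).contains i = false := by
        rw [PySem.Dict.contains_counter]; simp [hm]
      have hd0 : (PySem.Dict.counter l).getD i 0 = 0 := by
        rw [hd, List.count_eq_zero_of_not_mem hm]; rfl
      rw [Mval_append_not_mem l i hm]
      simp only [stepA, hc]
      rw [if_pos trivial, Prod.mk.injEq]
      exact ⟨by rw [hd0]; norm_num, rfl⟩

theorem B_out_eq (A : List Int) :
    ((PySem.List.dedup A).length : Int) +
      (((PySem.List.dedup A).filter (fun v => 2 ≤ PySem.List.count A v)).length : Int)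
    = Mval A := by
  unfold Mval
  have hcong : (PySem.List.dedup A).map (fun v => min ((A.count v : Int)) 2)
      = (PySem.List.dedup A).map
          (fun v => (fun _ => (1 : Int)) v +
            (if (fun w => decide (2 ≤ PySem.List.count A w)) v = true then (1 : Int) else 0)) := by
    apply List.map_congr_left
    intro v hv
    have h1 : 1 ≤ List.count v A := List.one_le_count_iff.mpr ((PySem.List.mem_dedup A v).mp hv)
    simp only [PySem.List.count_eq, decide_eq_true_eq]
    by_cases h2 : 2 ≤ List.count v A
    · have hmin : min ((List.count v A : Int)) 2 = 2 := by
        have : (2 : Int) ≤ (List.count v A : Int) := by exact_mod_cast h2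
        omega
      rw [if_pos h2, hmin]; norm_num
    · have hc1 : List.count v A = 1 := by omega
      rw [if_neg h2, hc1]; norm_num
  rw [hcong, PySem.List.sum_map_add_int, PySem.List.sum_map_const_int,
    PySem.List.sum_map_ite_one_zero, List.countP_eq_length_filter]
  ring

theorem solution_eq_alt (A : List Int) : solution A = solution_alt A := by
  cases hmax : PySem.List.max? A (fun x => x) with
  | none => simp only [solution, solution_alt, hmax]
  | some m =>
    simp only [solution, solution_alt, hmax, foldA_eq, ← B_out_eq A]
    rw [PySem.Dict.getD_counter A m]
    have hiff : ((2 : Int) ≤ (List.count m A : Int)) ↔ (2 ≤ PySem.List.count A m) := by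
      rw [PySem.List.count_eq]; exact_mod_cast Iff.rfl
    by_cases h2 : 2 ≤ PySem.List.count A m
    · rw [if_pos (hiff.mpr h2), if_pos h2]
    · rw [if_neg (fun hh => h2 (hiff.mp hh)), if_neg h2]

-- ===== VERDICT (by name: the statement is the Claim_ definition above) =====
theorem solution_spec : Claim_equal_solution := by
  intro A _ _
  unfold Spec_solution
  exact solution_eq_alt A
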